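-- pv_equiv track=rewrite | github.com/katariyaVivek/agentforge | src/pipeline/compressor.py | _rule_based_summarize
-- ===== SOURCE A (Python) =====
-- def _rule_based_summarize(content: str) -> str:
--     sentences = content.split(". ")
--     summary_parts = []
--     word_count = 0
--     target_words = 400
--     for sent in sentences:
--         words = sent.split()
--         if word_count + len(words) <= target_words:
--             summary_parts.append(sent)
--             word_count += len(words)
--         else:
--             break
--     result = ". ".join(summary_parts)
--     if not result.endswith("."):
--         result += "."
--     return result
-- ===== SOURCE B (Python) =====
-- from bisect import bisect_right
-- from itertools import accumulate
--
--
-- def _rule_based_summarize(content: str) -> str: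
--     sentences = content.split(". ")
--     prefix = list(accumulate(len(s.split()) for s in sentences))
--     # prefix sums are non-decreasing, so binary search finds the cutoff
--     n = bisect_right(prefix, 400)
--     result = ". ".join(sentences[:n])
--     return result if result.endswith(".") else result + "."
-- ===== Notes on version B (the rewrite author's own statement) =====
-- stated objective: alternative
-- what changed: B precomputes the prefix-sum table of per-sentence word counts and locates the cutoff with bisect_right (binary search over the monotone sums) instead of A's linear running-counter loop with break.
import Mathlib
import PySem

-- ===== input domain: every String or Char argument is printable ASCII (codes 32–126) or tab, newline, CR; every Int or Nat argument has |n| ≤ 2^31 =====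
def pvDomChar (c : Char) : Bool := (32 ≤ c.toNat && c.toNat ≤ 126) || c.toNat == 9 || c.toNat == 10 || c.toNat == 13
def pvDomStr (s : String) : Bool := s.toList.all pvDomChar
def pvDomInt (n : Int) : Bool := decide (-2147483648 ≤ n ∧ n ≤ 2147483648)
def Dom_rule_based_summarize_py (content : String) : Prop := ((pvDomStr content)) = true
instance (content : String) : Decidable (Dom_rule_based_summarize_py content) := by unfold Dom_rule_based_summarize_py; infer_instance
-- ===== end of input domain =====

-- B builds the prefix-sum table of per-sentence word counts and finds the cutoff by
-- binary search (bisect_right) instead of A's linear running-counter loop (objective: alternative).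

-- ===== PORT A =====
-- the for-loop with break, state = (summary_parts, word_count)
def pvLoopA : List String → List String → Int → List String
  | [], parts, _ => parts
  | s :: rest, parts, wc =>
    let w : Int := (PySem.Str.split₀ s).length
    if wc + w ≤ 400 then pvLoopA rest (parts ++ [s]) (wc + w) else parts

def rule_based_summarize_py (content : String) : String :=
  let sentences := (PySem.Str.split? content ". ").getD []
  let parts := pvLoopA sentences [] 0
  let result := PySem.Str.join ". " parts
  if PySem.Str.endswith result "." then result else result ++ "."

-- ===== PORT B =====
-- itertools.accumulate (running sums, no initial element)
def pvAccum : Int → List Int → List Int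
  | _, [] => []
  | acc, x :: xs => (acc + x) :: pvAccum (acc + x) xs

-- bisect.bisect_right: while lo < hi: mid = (lo+hi)//2; if x < a[mid]: hi = mid else lo = mid+1
-- (mid is always in range when lo < hi ≤ len, so a[mid] is ported as getD with default 0)
def pvBisectRight (l : List Int) (x : Int) (lo hi : Nat) : Nat :=
  if lo < hi then
    let mid := (lo + hi) / 2
    if x < l.getD mid 0 then pvBisectRight l x lo mid
    else pvBisectRight l x (mid + 1) hi
  else lo
termination_by hi - lo
decreasing_by all_goals omega

def rule_based_summarize_py_alt (content : String) : String :=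
  let sentences := (PySem.Str.split? content ". ").getD []
  let pref := pvAccum 0 (sentences.map (fun s => ((PySem.Str.split₀ s).length : Int)))
  let n := pvBisectRight pref 400 0 pref.length
  let result := PySem.Str.join ". " (sentences.take n)
  if PySem.Str.endswith result "." then result else result ++ "."

-- ===== PRECONDITION & SPEC =====
def Spec_rule_based_summarize_py (content : String) (out : String) : Prop := out = rule_based_summarize_py_alt content
instance (content : String) (out : String) : Decidable (Spec_rule_based_summarize_py content out) := by unfold Spec_rule_based_summarize_py; infer_instance

-- ===== CLAIM (what is proved, stated in full; the proofs are below) =====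
def Claim_equal_rule_based_summarize_py : Prop := ∀ (content : String), Dom_rule_based_summarize_py content → Spec_rule_based_summarize_py content (rule_based_summarize_py content)

-- ===== LEMMAS AND PROOFS =====

-- A's break loop returns the leading sentences whose running word sum stays ≤ 400,
-- i.e. take (length of the ≤ 400 prefix of the accumulated sums).
lemma pvLoopA_eq_take (xs : List String) : ∀ (parts : List String) (wc : Int),
    pvLoopA xs parts wc =
      parts ++ xs.take ((pvAccum wc (xs.map (fun s => ((PySem.Str.split₀ s).length : Int)))).takeWhile
        (fun c => decide (c ≤ 400))).length := by
  induction xs with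
  | nil => intro parts wc; simp [pvLoopA, pvAccum]
  | cons s rest ih =>
    intro parts wc
    simp only [pvLoopA, pvAccum, List.map_cons]
    by_cases h : wc + ((PySem.Str.split₀ s).length : Int) ≤ 400
    · simp [h, List.takeWhile, ih, List.take_succ_cons]
    · simp [h, List.takeWhile]

-- acc is a lower bound for every prefix sum of nonnegative increments
lemma pvAccum_head_le (xs : List Int) (acc : Int) (hx : ∀ y ∈ xs, 0 ≤ y) :
    ∀ k, k < (pvAccum acc xs).length → acc ≤ (pvAccum acc xs).getD k 0 := by
  induction xs generalizing acc with
  | nil => intro k hk; simp [pvAccum] at hk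
  | cons x xs ih =>
    intro k hk
    have h0 : 0 ≤ x := hx x (by simp)
    cases k with
    | zero => simp only [pvAccum, List.getD_cons_zero]; omega
    | succ k =>
      simp only [pvAccum, List.getD_cons_succ]
      have := ih (acc + x) (fun y hy => hx y (List.mem_cons_of_mem _ hy)) k
        (by simp only [pvAccum, List.length_cons] at hk; omega)
      omega

-- prefix sums of nonnegative increments are monotone in the index (getD version)
lemma pvAccum_mono (xs : List Int) (acc : Int) (hx : ∀ y ∈ xs, 0 ≤ y) :
    ∀ i j, i ≤ j → j < (pvAccum acc xs).length →
      (pvAccum acc xs).getD i 0 ≤ (pvAccum acc xs).getD j 0 := by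
  induction xs generalizing acc with
  | nil => intro i j _ hj; simp [pvAccum] at hj
  | cons x xs ih =>
    intro i j hij hj
    have hx' : ∀ y ∈ xs, 0 ≤ y := fun y hy => hx y (List.mem_cons_of_mem _ hy)
    have hj' : j ≤ (pvAccum (acc + x) xs).length := by
      simp only [pvAccum, List.length_cons] at hj; omega
    match i, j with
    | 0, 0 => exact le_refl _
    | 0, (j+1) =>
      simp only [pvAccum, List.getD_cons_zero, List.getD_cons_succ]
      exact pvAccum_head_le xs (acc + x) hx' j (by omega)
    | (i+1), (j+1) =>
      simp only [pvAccum, List.getD_cons_succ]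
      exact ih (acc + x) hx' i j (by omega) (by omega)

-- takeWhile facts indexed via getD
lemma takeWhile_getD_true (l : List Int) (p : Int → Bool) :
    ∀ i, i < (l.takeWhile p).length → p (l.getD i 0) = true := by
  induction l with
  | nil => intro i h; simp at h
  | cons x xs ih =>
    intro i h
    by_cases hp : p x
    · rw [List.takeWhile_cons_of_pos hp] at h
      cases i with
      | zero => simpa using hp
      | succ i =>
        simp only [List.getD_cons_succ]
        exact ih i (by simpa using h)
    · rw [List.takeWhile_cons_of_neg (by simpa using hp)] at h
      simp at h

lemma takeWhile_getD_false (l : List Int) (p : Int → Bool)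
    (h : (l.takeWhile p).length < l.length) :
    p (l.getD (l.takeWhile p).length 0) = false := by
  induction l with
  | nil => simp at h
  | cons x xs ih =>
    by_cases hp : p x
    · rw [List.takeWhile_cons_of_pos hp] at h ⊢
      simp only [List.length_cons, List.getD_cons_succ]
      exact ih (by simpa using h)
    · rw [List.takeWhile_cons_of_neg (by simpa using hp)]
      simpa using hp

lemma takeWhile_length_le (l : List Int) (p : Int → Bool) :
    (l.takeWhile p).length ≤ l.length := (List.takeWhile_sublist p).length_le

-- bisect_right on a monotone list computes the length of the ≤ x prefix
lemma pvBisectRight_spec (l : List Int) (x : Int)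
    (hmono : ∀ i j, i ≤ j → j < l.length → l.getD i 0 ≤ l.getD j 0) :
    ∀ lo hi, lo ≤ hi → hi ≤ l.length →
      lo ≤ (l.takeWhile (fun c => decide (c ≤ x))).length →
      (l.takeWhile (fun c => decide (c ≤ x))).length ≤ hi →
      pvBisectRight l x lo hi = (l.takeWhile (fun c => decide (c ≤ x))).length := by
  intro lo hi
  induction hn : hi - lo using Nat.strong_induction_on generalizing lo hi with
  | _ n ih =>
    intro hlohi hhil hlok hkhi
    set k := (l.takeWhile (fun c => decide (c ≤ x))).length with hk
    rw [pvBisectRight]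
    by_cases hlt : lo < hi
    · simp only [hlt, if_true]
      set mid := (lo + hi) / 2 with hmid
      have hmidlt : mid < hi := by omega
      have hmidge : lo ≤ mid := by omega
      by_cases hcmp : x < l.getD mid 0
      · simp only [hcmp, if_true]
        -- then k ≤ mid: otherwise l.getD mid 0 ≤ x
        have hkmid : k ≤ mid := by
          by_contra hc
          have h2 : l.getD mid 0 ≤ x := by
            have := takeWhile_getD_true l (fun c => decide (c ≤ x)) mid (by omega)
            simpa using this
          omega
        exact ih (mid - lo) (by omega) lo mid rfl hmidge (by omega) hlok hkmid
      · simp only [hcmp, if_false]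
        -- l.getD mid 0 ≤ x, so mid + 1 ≤ k (by monotonicity)
        have hle : l.getD mid 0 ≤ x := by omega
        have hkmid : mid + 1 ≤ k := by
          by_contra hc
          have hklen : k < l.length := by omega
          have h3 : x < l.getD k 0 := by
            have hf := takeWhile_getD_false l (fun c => decide (c ≤ x)) (by rw [← hk]; omega)
            rw [← hk] at hf
            simpa using hf
          have := hmono k mid (by omega) (by omega)
          omega
        exact ih (hi - (mid + 1)) (by omega) (mid + 1) hi rfl (by omega) hhil hkmid hkhi
    · simp only [hlt, if_false]
      omega

-- ===== VERDICT (by name: the statement is the Claim_ definition above) =====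
theorem rule_based_summarize_py_spec : Claim_equal_rule_based_summarize_py := by
  intro content _
  unfold Spec_rule_based_summarize_py rule_based_summarize_py rule_based_summarize_py_alt
  simp only [pvLoopA_eq_take, List.nil_append]
  set xs := (PySem.Str.split? content ". ").getD [] with hxs
  set counts := xs.map (fun s => ((PySem.Str.split₀ s).length : Int)) with hcounts
  have hnn : ∀ y ∈ counts, 0 ≤ y := by
    intro y hy
    rw [hcounts] at hy
    simp only [List.mem_map] at hy
    obtain ⟨s, _, rfl⟩ := hy
    positivity
  have hmono := pvAccum_mono counts 0 hnn
  have hb := pvBisectRight_spec (pvAccum 0 counts) 400 hmono 0 (pvAccum 0 counts).length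
    (Nat.zero_le _) le_rfl (Nat.zero_le _)
    (takeWhile_length_le (pvAccum 0 counts) (fun c => decide (c ≤ 400)))
  rw [hb]
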